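-- pv_equiv track=rewrite | github.com/hovinh/codenames_cheat_engine | spymaster.py | simplify_score_symset_to_word
-- ===== SOURCE A (Python) =====
-- def simplify_score_symset_to_word(symset_score_dict, synset_word_dict):
--     word_score_dict = dict()
--     for ss, score in symset_score_dict.items():
--         word = synset_word_dict[ss]
--
--         if (word not in word_score_dict.keys()):
--             word_score_dict[word] = score
--         elif (score > word_score_dict[word]):
--             word_score_dict[word] = score
--
--     return word_score_dict
-- ===== SOURCE B (Python) =====
-- def simplify_score_symset_to_word(symset_score_dict, synset_word_dict):
--     groups = {}
--     for ss, score in symset_score_dict.items():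
--         word = synset_word_dict[ss]
--         groups[word] = groups.get(word, []) + [score]
--     return {word: max(scores) for word, scores in groups.items()}
-- ===== Notes on version B (the rewrite author's own statement) =====
-- stated objective: alternative
-- what changed: B groups all scores of each word into a per-word list in one pass and then reduces each group with max in a second pass, instead of A's single pass keeping a running maximum with conditional branches.
import Mathlib
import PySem

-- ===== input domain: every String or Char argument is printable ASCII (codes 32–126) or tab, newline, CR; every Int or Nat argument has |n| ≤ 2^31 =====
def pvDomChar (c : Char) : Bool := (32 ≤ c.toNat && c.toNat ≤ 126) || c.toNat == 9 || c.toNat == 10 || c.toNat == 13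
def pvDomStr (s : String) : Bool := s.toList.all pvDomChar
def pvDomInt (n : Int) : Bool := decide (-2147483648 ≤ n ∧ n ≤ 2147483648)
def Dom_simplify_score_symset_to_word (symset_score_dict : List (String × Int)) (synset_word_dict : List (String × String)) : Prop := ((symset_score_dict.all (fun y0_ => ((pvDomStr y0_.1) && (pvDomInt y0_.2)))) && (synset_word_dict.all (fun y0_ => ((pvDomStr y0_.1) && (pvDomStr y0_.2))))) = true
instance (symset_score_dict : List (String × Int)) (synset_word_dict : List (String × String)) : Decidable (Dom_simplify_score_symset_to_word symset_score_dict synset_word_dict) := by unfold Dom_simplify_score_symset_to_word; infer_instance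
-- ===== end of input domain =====

-- B groups each word's scores into a list in one pass and takes max per group in a second
-- pass, instead of A's inline running maximum; alternative decomposition, same cost.


-- ===== PORT A =====
-- loop body of A: `word = synset_word_dict[ss]` is `getD … ""`; the default "" is only
-- reached where Python raises KeyError, which Pre_ excludes.
def stepA (synset_word_dict : List (String × String)) (word_score_dict : PySem.Dict String Int)
    (p : String × Int) : PySem.Dict String Int :=
  let word := (PySem.Dict.mk synset_word_dict).getD p.1 ""
  if (word_score_dict.contains word) = false then word_score_dict.insert word p.2
  else if p.2 > word_score_dict.getD word 0 then word_score_dict.insert word p.2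
  else word_score_dict

def simplify_score_symset_to_word (symset_score_dict : List (String × Int)) (synset_word_dict : List (String × String)) : List (String × Int) :=
  (symset_score_dict.foldl (stepA synset_word_dict) PySem.Dict.empty).items

-- ===== PORT B =====
-- loop body of B: `groups[word] = groups.get(word, []) + [score]`
def stepB (synset_word_dict : List (String × String)) (groups : PySem.Dict String (List Int))
    (p : String × Int) : PySem.Dict String (List Int) :=
  let word := (PySem.Dict.mk synset_word_dict).getD p.1 ""
  groups.insert word (groups.getD word [] ++ [p.2])

-- max(scores); the default 0 is only reached on an empty list, which Python's max rejects
-- and which never occurs for the nonempty groups B builds.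
def pyMaxInt (l : List Int) : Int := (PySem.List.max? l (fun x => x)).getD 0

def simplify_score_symset_to_word_alt (symset_score_dict : List (String × Int)) (synset_word_dict : List (String × String)) : List (String × Int) :=
  (symset_score_dict.foldl (stepB synset_word_dict) PySem.Dict.empty).items.map
    (fun q => (q.1, pyMaxInt q.2))

-- ===== PRECONDITION & SPEC =====
-- Pre_ excludes exactly the inputs on which A raises KeyError: a synset key with no entry
-- in synset_word_dict (B raises there too).
def Pre_simplify_score_symset_to_word (symset_score_dict : List (String × Int)) (synset_word_dict : List (String × String)) : Prop :=
  ∀ p ∈ symset_score_dict, p.1 ∈ synset_word_dict.map Prod.fst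
instance (symset_score_dict : List (String × Int)) (synset_word_dict : List (String × String)) : Decidable (Pre_simplify_score_symset_to_word symset_score_dict synset_word_dict) := by unfold Pre_simplify_score_symset_to_word; infer_instance

def pvWitness_simplify_score_symset_to_word : (List (String × Int)) × (List (String × String)) :=
  ([("dog.n.01", 3), ("cat.n.01", 5), ("canine.n.02", 1)],
   [("dog.n.01", "dog"), ("canine.n.02", "dog"), ("cat.n.01", "cat")])

def Spec_simplify_score_symset_to_word (symset_score_dict : List (String × Int)) (synset_word_dict : List (String × String)) (out : List (String × Int)) : Prop := out = simplify_score_symset_to_word_alt symset_score_dict synset_word_dict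
instance (symset_score_dict : List (String × Int)) (synset_word_dict : List (String × String)) (out : List (String × Int)) : Decidable (Spec_simplify_score_symset_to_word symset_score_dict synset_word_dict out) := by unfold Spec_simplify_score_symset_to_word; infer_instance

-- ===== CLAIM (what is proved, stated in full; the proofs are below) =====
def Claim_equal_simplify_score_symset_to_word : Prop := ∀ (symset_score_dict : List (String × Int)) (synset_word_dict : List (String × String)), Dom_simplify_score_symset_to_word symset_score_dict synset_word_dict → Pre_simplify_score_symset_to_word symset_score_dict synset_word_dict → Spec_simplify_score_symset_to_word symset_score_dict synset_word_dict (simplify_score_symset_to_word symset_score_dict synset_word_dict)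

-- ===== LEMMAS AND PROOFS =====

theorem max?_cons_int (x : Int) (xs : List Int) :
    PySem.List.max? (x :: xs) (fun y => y) = some (xs.foldl max x) := by
  simp only [PySem.List.max?, List.foldl_cons]
  induction xs generalizing x with
  | nil => rfl
  | cons y t ih =>
      simp only [List.foldl_cons]
      rcases lt_or_ge x y with h | h
      · rw [max_eq_right (le_of_lt h), ← ih y]; simp [h]
      · rw [max_eq_left h, ← ih x]; simp [not_lt.mpr h]

theorem pyMaxInt_cons (x : Int) (xs : List Int) : pyMaxInt (x :: xs) = xs.foldl max x := by
  simp [pyMaxInt, max?_cons_int]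

theorem pyMaxInt_append (l : List Int) (v : Int) (h : l ≠ []) :
    pyMaxInt (l ++ [v]) = max (pyMaxInt l) v := by
  rcases l with _ | ⟨x, xs⟩
  · exact absurd rfl h
  · simp [pyMaxInt_cons, List.foldl_append]

theorem keys_of_items_map {dA : PySem.Dict String Int} {g : PySem.Dict String (List Int)}
    (h : dA.items = g.items.map (fun q => (q.1, pyMaxInt q.2))) : dA.keys = g.keys := by
  simp only [PySem.Dict.keys, h, List.map_map]
  rfl

theorem loop_inv (synset_word_dict : List (String × String)) (l : List (String × Int))
    (dA : PySem.Dict String Int) (g : PySem.Dict String (List Int))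
    (hnd : g.keys.Nodup) (hne : ∀ p ∈ g.items, p.2 ≠ [])
    (hit : dA.items = g.items.map (fun q => (q.1, pyMaxInt q.2))) :
    (l.foldl (stepA synset_word_dict) dA).items
      = (l.foldl (stepB synset_word_dict) g).items.map (fun q => (q.1, pyMaxInt q.2)) := by
  induction l generalizing dA g with
  | nil => simpa using hit
  | cons p t ih =>
      simp only [List.foldl_cons]
      set w := (PySem.Dict.mk synset_word_dict).getD p.1 "" with hw
      have hkeys : dA.keys = g.keys := keys_of_items_map hit
      have hcont : dA.contains w = g.contains w := by
        rw [PySem.Dict.contains_eq_decide_mem_keys, PySem.Dict.contains_eq_decide_mem_keys, hkeys]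
      by_cases hc : g.contains w = true
      · -- word already grouped: A either updates the running max or leaves it; B appends
        obtain ⟨lv, hget⟩ : ∃ lv, g.get? w = some lv := by
          have := PySem.Dict.contains_eq_isSome_get? g w
          rw [hc] at this
          exact Option.isSome_iff_exists.mp this.symm
        have hmem : (w, lv) ∈ g.items := PySem.Dict.mem_items_of_get?_eq_some g hget
        have hlvne : lv ≠ [] := hne _ hmem
        have hgD : g.getD w [] = lv := by rw [PySem.Dict.getD_eq_get?_getD, hget]; rfl
        have hAmem : (w, pyMaxInt lv) ∈ dA.items := by
          rw [hit]; exact List.mem_map.mpr ⟨(w, lv), hmem, rfl⟩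
        have hAnd : dA.keys.Nodup := hkeys ▸ hnd
        have hAD : dA.getD w 0 = pyMaxInt lv := PySem.Dict.getD_of_mem_items dA hAmem hAnd 0
        have huniq : ∀ q ∈ g.items, q.1 = w → q.2 = lv := by
          intro q hq hq1
          have : g.get? q.1 = some q.2 :=
            (PySem.Dict.get?_eq_some_iff_mem_items g q.1 q.2 hnd).mpr (by simpa using hq)
          rw [hq1, hget] at this
          exact (Option.some_inj.mp this).symm
        have hitemsB : (stepB synset_word_dict g p).items
            = g.items.map (fun q => if (q.1 == w) = true then (w, lv ++ [p.2]) else q) := by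
          simp only [stepB, ← hw, hgD]
          exact PySem.Dict.items_insert_of_contains g _ hc
        have hndB : (stepB synset_word_dict g p).keys.Nodup := by
          have : (stepB synset_word_dict g p).keys = g.keys := by
            simp only [PySem.Dict.keys, hitemsB, List.map_map]
            refine List.map_congr_left ?_
            intro q _; by_cases hq : q.1 = w <;> simp [hq]
          rw [this]; exact hnd
        have hneB : ∀ q ∈ (stepB synset_word_dict g p).items, q.2 ≠ [] := by
          intro q hq
          rw [hitemsB] at hq
          obtain ⟨r, hr, hrq⟩ := List.mem_map.mp hq
          by_cases h1 : r.1 = w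
          · simp [h1] at hrq; rw [← hrq]; simp
          · simp [h1] at hrq; rw [← hrq]; exact hne _ hr
        apply ih _ _ hndB hneB
        -- the one-step item-list relation
        rw [hitemsB]
        have hcA : (dA.contains w) = false ↔ False := by simp [hcont, hc]
        by_cases hgt : p.2 > dA.getD w 0
        · -- A updates
          have : stepA synset_word_dict dA p = dA.insert w p.2 := by
            simp [stepA, ← hw, hcont, hc, hgt]
          rw [this, PySem.Dict.items_insert_of_contains dA p.2 (by rw [hcont]; exact hc),
              hit, List.map_map, List.map_map]
          refine List.map_congr_left ?_
          intro q hq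
          by_cases h1 : q.1 = w
          · have h2 := huniq q hq h1
            simp [Function.comp, h1, pyMaxInt_append lv p.2 hlvne,
                  max_eq_right (le_of_lt (by rw [hAD] at hgt; exact hgt))]
          · simp [Function.comp, h1]
        · -- A keeps the old max
          have : stepA synset_word_dict dA p = dA := by
            simp [stepA, ← hw, hcont, hc, hgt]
          rw [this, hit, List.map_map]
          refine List.map_congr_left ?_
          intro q hq
          by_cases h1 : q.1 = w
          · have h2 := huniq q hq h1
            have hle : p.2 ≤ pyMaxInt lv := by rw [hAD] at hgt; omega
            simp [Function.comp, h1, h2, pyMaxInt_append lv p.2 hlvne, max_eq_left hle]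
          · simp [Function.comp, h1]
      · -- fresh word: both append a new entry
        have hcg : g.contains w = false := by simpa using hc
        have hcA : dA.contains w = false := by rw [hcont]; exact hcg
        have hB : stepB synset_word_dict g p = g.insert w [p.2] := by
          simp [stepB, ← hw, PySem.Dict.getD_of_not_contains g [] hcg]
        have hA : stepA synset_word_dict dA p = dA.insert w p.2 := by
          simp [stepA, ← hw, hcA]
        have hwnotmem : w ∉ g.keys := by
          have := PySem.Dict.contains_eq_decide_mem_keys g w
          rw [hcg] at this
          exact of_decide_eq_false this.symm
        have hndB : (stepB synset_word_dict g p).keys.Nodup := by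
          rw [hB, PySem.Dict.keys_insert_of_not_contains _ _ hcg]
          simp only [List.nodup_append]
          exact ⟨hnd, List.nodup_singleton w, fun a ha b hb h => hwnotmem ((h.trans (by simpa using hb)) ▸ ha)⟩
        have hneB : ∀ q ∈ (stepB synset_word_dict g p).items, q.2 ≠ [] := by
          intro q hq
          rw [hB, PySem.Dict.items_insert_of_not_contains g _ hcg] at hq
          rcases List.mem_append.mp hq with h | h
          · exact hne _ h
          · simp at h; rw [h]; simp
        apply ih _ _ hndB hneB
        rw [hA, hB, PySem.Dict.items_insert_of_not_contains dA p.2 hcA,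
            PySem.Dict.items_insert_of_not_contains g _ hcg, hit]
        simp [pyMaxInt, PySem.List.max?]

-- ===== VERDICT (by name: the statement is the Claim_ definition above) =====
theorem simplify_score_symset_to_word_spec : Claim_equal_simplify_score_symset_to_word := by
  intro ssd swd _ _
  unfold Spec_simplify_score_symset_to_word
  unfold simplify_score_symset_to_word simplify_score_symset_to_word_alt
  exact loop_inv swd ssd PySem.Dict.empty PySem.Dict.empty
    (by simp [PySem.Dict.empty, PySem.Dict.keys]) (by simp [PySem.Dict.empty]) rfl
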